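-- pv_equiv track=rewrite | github.com/mcwalrus/bd-docs | src/bd_docs/harvest.py | _usage_matches_chain
-- ===== SOURCE A (Python) =====
-- def _usage_matches_chain(help_text: str, cmd_chain: list[str]) -> bool:
--     """
--     Return True when `Usage:` appears to correspond to the exact command chain.
--
--     This prevents recursing through pseudo-subcommands where `bd` falls back to
--     a parent help page (e.g. `bd gate human --help` returning `bd gate [command]`).
--     """
--     in_usage = False
--     for raw_line in help_text.splitlines():
--         line = raw_line.strip()
--         if line == "Usage:":
--             in_usage = True
--             continue
--         if not in_usage:
--             continue
--         if not line:
--             # End of usage block.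
--             break
--         if not line.startswith("bd "):
--             continue
--         usage_tokens = line.split()
--         # Compare only concrete command tokens and ignore placeholders like [flags].
--         concrete = [tok for tok in usage_tokens[1:] if not tok.startswith("[") and not tok.startswith("<")]
--         return concrete == cmd_chain
--     return False
-- ===== SOURCE B (Python) =====
-- def _usage_matches_chain(help_text: str, cmd_chain: list[str]) -> bool:
--     lines = [line.strip() for line in help_text.splitlines()]
--     if "Usage:" not in lines:
--         return False
--     after = lines[lines.index("Usage:") + 1:]
--     block = after[:after.index("")] if "" in after else after
--     bd_lines = [line for line in block if line.startswith("bd ")]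
--     if not bd_lines:
--         return False
--     tokens = bd_lines[0].split()
--     concrete = [tok for tok in tokens[1:] if not tok.startswith("[") and not tok.startswith("<")]
--     return concrete == cmd_chain
-- ===== Notes on version B (the rewrite author's own statement) =====
-- stated objective: simpler
-- what changed: Replaces A's stateful line-by-line flag machine with a declarative extract-then-query pipeline: strip all lines once, slice out the usage block between 'Usage:' and the first blank line via index lookups, filter it for 'bd ' lines and compare the first one's concrete tokens.
import Mathlib
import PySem

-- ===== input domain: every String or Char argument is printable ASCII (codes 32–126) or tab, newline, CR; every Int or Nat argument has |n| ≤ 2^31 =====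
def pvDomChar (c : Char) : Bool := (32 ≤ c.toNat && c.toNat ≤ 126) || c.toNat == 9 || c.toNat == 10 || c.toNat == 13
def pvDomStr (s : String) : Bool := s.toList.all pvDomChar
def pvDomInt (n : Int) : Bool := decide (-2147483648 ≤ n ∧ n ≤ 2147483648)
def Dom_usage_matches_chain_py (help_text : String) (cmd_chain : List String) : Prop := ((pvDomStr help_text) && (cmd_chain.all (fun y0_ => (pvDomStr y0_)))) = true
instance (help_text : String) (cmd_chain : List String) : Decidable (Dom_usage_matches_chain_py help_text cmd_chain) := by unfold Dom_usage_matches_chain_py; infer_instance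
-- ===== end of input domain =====

-- B replaces A's stateful flag-machine loop by an extract-then-query pipeline (strip all
-- lines, slice the usage block out by index lookups, filter it); objective: simpler.

-- B replaces A's stateful flag-machine loop by an extract-then-query pipeline (strip all
-- lines, find the usage block by index lookups, filter it for the 'bd ' line); objective: simpler.

-- ===== PORT A =====
-- the concrete-token comparison, the same expression in both Pythons
def pvConcreteEq (line : String) (cmd_chain : List String) : Bool :=
  ((PySem.Str.split₀ line).drop 1).filter
    (fun tok => !(PySem.Str.startswith tok "[") && !(PySem.Str.startswith tok "<")) == cmd_chain

-- A's for-loop with the in_usage flag, early return and break, step for step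
def pvLoopA (cmd_chain : List String) : List String → Bool → Bool
  | [], _ => false
  | raw_line :: rest, in_usage =>
    let line := PySem.Str.strip raw_line
    if line == "Usage:" then pvLoopA cmd_chain rest true
    else if !in_usage then pvLoopA cmd_chain rest in_usage
    else if line == "" then false
    else if !(PySem.Str.startswith line "bd ") then pvLoopA cmd_chain rest in_usage
    else pvConcreteEq line cmd_chain


def usage_matches_chain_py (help_text : String) (cmd_chain : List String) : Bool :=
  pvLoopA cmd_chain (PySem.Str.splitlines help_text) false

-- ===== PORT B =====
def usage_matches_chain_py_alt (help_text : String) (cmd_chain : List String) : Bool :=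
  let lines := (PySem.Str.splitlines help_text).map PySem.Str.strip
  match PySem.List.index? lines "Usage:" with
  | none => false                                  -- "Usage:" not in lines
  | some i =>
    let after := lines.drop (i + 1)                -- lines[i+1:]  (index? is a nonneg index)
    let block := match PySem.List.index? after "" with
      | some j => after.take j                     -- after[:after.index("")]
      | none => after
    match block.filter (fun l => PySem.Str.startswith l "bd ") with
    | [] => false
    | first :: _ => pvConcreteEq first cmd_chain

-- ===== PRECONDITION & SPEC =====
def Spec_usage_matches_chain_py (help_text : String) (cmd_chain : List String) (out : Bool) : Prop := out = usage_matches_chain_py_alt help_text cmd_chain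
instance (help_text : String) (cmd_chain : List String) (out : Bool) : Decidable (Spec_usage_matches_chain_py help_text cmd_chain out) := by unfold Spec_usage_matches_chain_py; infer_instance

-- ===== CLAIM (what is proved, stated in full; the proofs are below) =====
def Claim_equal_usage_matches_chain_py : Prop := ∀ (help_text : String) (cmd_chain : List String), Dom_usage_matches_chain_py help_text cmd_chain → Spec_usage_matches_chain_py help_text cmd_chain (usage_matches_chain_py help_text cmd_chain)

-- ===== LEMMAS AND PROOFS =====

-- B's second phase, as a scan over the already-stripped lines (proof-side view of B)
def pvScanSpec (cmd_chain : List String) (ls : List String) : Bool :=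
  match (ls.takeWhile (fun l => !(l == ""))).filter (fun l => PySem.Str.startswith l "bd ") with
  | [] => false
  | first :: _ => pvConcreteEq first cmd_chain

theorem pv_block_eq_takeWhile (ls : List String) :
    (match PySem.List.index? ls "" with
     | some j => ls.take j
     | none => ls) = ls.takeWhile (fun l => !(l == "")) := by
  induction ls with
  | nil => simp [PySem.List.index?]
  | cons l rest ih =>
    by_cases h : l = ""
    · subst h
      rw [PySem.List.index?_cons_self]
      simp [List.takeWhile]
    · rw [PySem.List.index?_cons_of_ne rest h, List.takeWhile_cons, if_pos (by simpa using h)]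
      cases hc : PySem.List.index? rest "" with
      | none => rw [hc] at ih; simpa [hc] using congrArg (List.cons l) ih
      | some j => rw [hc] at ih; simpa [hc] using congrArg (List.cons l) ih

theorem pv_loopA_true (cmd_chain : List String) (raws : List String) :
    pvLoopA cmd_chain raws true = pvScanSpec cmd_chain (raws.map PySem.Str.strip) := by
  induction raws with
  | nil => rfl
  | cons raw rest ih =>
    simp only [pvLoopA, List.map_cons, Bool.not_true, Bool.false_eq_true, if_false]
    generalize PySem.Str.strip raw = line
    unfold pvScanSpec
    by_cases hu : line = "Usage:"
    · subst hu
      rw [if_pos (by decide), List.takeWhile_cons, if_pos (by decide), List.filter_cons,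
        if_neg (by decide), ih]
      rfl
    · rw [if_neg (by simpa using hu)]
      by_cases hb : line = ""
      · subst hb
        rw [if_pos (by decide), List.takeWhile_cons, if_neg (by decide)]
        rfl
      · rw [if_neg (by simpa using hb)]
        by_cases hs : PySem.Str.startswith line "bd " = true
        · rw [if_neg (by simpa using hs), List.takeWhile_cons, if_pos (by simpa using hb),
            List.filter_cons, if_pos hs]
        · rw [if_pos (by simpa using hs), ih, List.takeWhile_cons, if_pos (by simpa using hb),
            List.filter_cons, if_neg (by simpa using hs)]
          rfl

theorem pv_loopA_false (cmd_chain : List String) (raws : List String) :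
    pvLoopA cmd_chain raws false =
      (match PySem.List.index? (raws.map PySem.Str.strip) "Usage:" with
       | none => false
       | some i => pvLoopA cmd_chain (raws.drop (i + 1)) true) := by
  induction raws with
  | nil => simp [pvLoopA, PySem.List.index?]
  | cons raw rest ih =>
    simp only [pvLoopA, List.map_cons, Bool.not_false, if_true]
    by_cases hu : PySem.Str.strip raw = "Usage:"
    · rw [hu, PySem.List.index?_cons_self]
      simp
    · rw [PySem.List.index?_cons_of_ne (rest.map PySem.Str.strip) hu]
      rw [if_neg (by simpa using hu), ih]
      cases hc : PySem.List.index? (rest.map PySem.Str.strip) "Usage:" with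
      | none => simp
      | some i => simp [List.drop_succ_cons]

-- ===== VERDICT (by name: the statement is the Claim_ definition above) =====
theorem usage_matches_chain_py_spec : Claim_equal_usage_matches_chain_py := by
  intro help_text cmd_chain _
  unfold Spec_usage_matches_chain_py usage_matches_chain_py usage_matches_chain_py_alt
  rw [pv_loopA_false]
  cases hc : PySem.List.index? ((PySem.Str.splitlines help_text).map PySem.Str.strip) "Usage:" with
  | none => simp only [hc]
  | some i =>
    simp only [hc]
    rw [pv_loopA_true, List.map_drop, pv_block_eq_takeWhile]
    rfl
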